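-- pv_equiv track=rewrite | github.com/iteong/comp9021-principles-of-programming | lectures/Lecture_2/three_special_perfect_squares_v1.py | completed_set_of_digits_if_ok
-- ===== SOURCE A (Python) =====
-- def completed_set_of_digits_if_ok(number, digits_seen_so_far):
--     digits_seen_now = set(digits_seen_so_far)
--     while number:
--         # Extract rightmost digit, d, from number
--         digit = number % 10
--         if digit in digits_seen_now:
--             return None
--         digits_seen_now.add(digit)
--         # Get rid of rightmost digit of number
--         number //= 10
--     return digits_seen_now
-- ===== SOURCE B (Python) =====
-- def completed_set_of_digits_if_ok(number, digits_seen_so_far):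
--     # Two-phase: collect digits, then validate in bulk by cardinality/disjointness.
--     if number < 0:
--         # A's extraction loop always ends up revisiting digit 9 on negatives.
--         return None
--     digits = []
--     while number > 0:
--         digits.append(number % 10)
--         number //= 10
--     if len(set(digits)) != len(digits):
--         return None
--     seen = set(digits_seen_so_far)
--     if not seen.isdisjoint(digits):
--         return None
--     return seen | set(digits)
-- ===== Notes on version B (the rewrite author's own statement) =====
-- stated objective: alternative
-- what changed: A validates digit-by-digit inside the extraction loop (membership test + add per step); B first collects the digit list (returning None outright for negatives, where repeated floor-division makes a digit repeat), then validates in bulk by cardinality (len(set(digits)) == len(digits)) and set disjointness, and returns seen | set(digits).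
import Mathlib
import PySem

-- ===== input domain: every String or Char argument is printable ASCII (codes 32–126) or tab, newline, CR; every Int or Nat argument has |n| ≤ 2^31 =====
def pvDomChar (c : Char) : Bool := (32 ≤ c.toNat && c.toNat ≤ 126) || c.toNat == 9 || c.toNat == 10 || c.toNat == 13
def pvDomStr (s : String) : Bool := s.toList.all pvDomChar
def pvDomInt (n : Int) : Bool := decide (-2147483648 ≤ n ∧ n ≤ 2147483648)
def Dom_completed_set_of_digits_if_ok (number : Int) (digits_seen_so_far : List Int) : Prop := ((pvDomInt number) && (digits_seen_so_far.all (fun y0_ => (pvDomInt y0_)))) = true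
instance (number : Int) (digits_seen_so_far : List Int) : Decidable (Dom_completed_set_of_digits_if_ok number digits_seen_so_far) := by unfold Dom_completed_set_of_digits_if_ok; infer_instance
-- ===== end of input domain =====

-- B replaces A's per-digit add-and-check with a two-phase collect-then-bulk-validate
-- (cardinality + disjointness) decomposition; same cost, different structure.

-- ===== PORT A =====
-- A's while loop: extract rightmost digit, fail on a repeat, add, drop digit.
-- It terminates on every Int (for negatives the quotient stabilises at -1 and digit 9 repeats);
-- the port recurses on a fuel argument proved sufficient below (pvALoop_fuel_irrel is not needed:
-- the top-level fuel 2*|number|+2 is shown to reach the loop's exit in every case).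
def pvALoop : Nat → Int → PySem.Set Int → Option (List Int)
  | 0, _, _ => none  -- fuel guard only; never reached with the fuel supplied below
  | fuel + 1, number, seen =>
      if number ≠ 0 then
        if PySem.Set.contains seen (PySem.Int.mod number 10) = true then none
        else pvALoop fuel (PySem.Int.floordiv number 10) (PySem.Set.add seen (PySem.Int.mod number 10))
      else some seen

def completed_set_of_digits_if_ok (number : Int) (digits_seen_so_far : List Int) : Option (List Int) :=
  pvALoop (2 * number.natAbs + 2) number (PySem.Set.ofList digits_seen_so_far)

-- ===== PORT B =====
-- B's collection loop: `while number > 0: digits.append(number % 10); number //= 10`,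
-- again on a fuel argument (|number| bounds the digit count).
def pvDigits : Nat → Int → List Int
  | 0, _ => []  -- fuel guard only; never reached with the fuel supplied below
  | fuel + 1, number =>
      if 0 < number then PySem.Int.mod number 10 :: pvDigits fuel (PySem.Int.floordiv number 10)
      else []

def completed_set_of_digits_if_ok_alt (number : Int) (digits_seen_so_far : List Int) : Option (List Int) :=
  if number < 0 then none
  else if PySem.Set.len (PySem.Set.ofList (pvDigits number.natAbs number)) ≠ (((pvDigits number.natAbs number).length : Int)) then none
  else if ¬ (PySem.Set.isdisjoint (PySem.Set.ofList digits_seen_so_far) (pvDigits number.natAbs number) = true) then none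
  else some (PySem.Set.union (PySem.Set.ofList digits_seen_so_far) (pvDigits number.natAbs number))

-- ===== PRECONDITION & SPEC =====
def Spec_completed_set_of_digits_if_ok (number : Int) (digits_seen_so_far : List Int) (out : Option (List Int)) : Prop := out = completed_set_of_digits_if_ok_alt number digits_seen_so_far
instance (number : Int) (digits_seen_so_far : List Int) (out : Option (List Int)) : Decidable (Spec_completed_set_of_digits_if_ok number digits_seen_so_far out) := by unfold Spec_completed_set_of_digits_if_ok; infer_instance

-- ===== CLAIM (what is proved, stated in full; the proofs are below) =====
def Claim_equal_completed_set_of_digits_if_ok : Prop := ∀ (number : Int) (digits_seen_so_far : List Int), Dom_completed_set_of_digits_if_ok number digits_seen_so_far → Spec_completed_set_of_digits_if_ok number digits_seen_so_far (completed_set_of_digits_if_ok number digits_seen_so_far)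

-- ===== LEMMAS AND PROOFS =====

-- A's loop on a negative number never returns a set: the quotient stays negative forever
-- and a digit eventually repeats (9, once the quotient reaches -1).
theorem pvALoop_neg : ∀ (fuel : Nat) (n : Int) (s : PySem.Set Int), n < 0 →
    2 * n.natAbs + (if s.contains 9 = false then 1 else 0) + 1 ≤ fuel →
    pvALoop fuel n s = none := by
  intro fuel
  induction fuel with
  | zero => intro n s hneg hf; omega
  | succ f ih =>
      intro n s hneg hf
      have hn : n ≠ 0 := by omega
      rw [pvALoop, if_pos hn]
      by_cases hc : PySem.Set.contains s (PySem.Int.mod n 10) = true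
      · rw [if_pos hc]
      · rw [if_neg hc]
        have hqr := PySem.Int.floordiv_mul_add_mod n 10
        have hr0 : 0 ≤ PySem.Int.mod n 10 := PySem.Int.mod_nonneg n (by norm_num)
        have hr10 : PySem.Int.mod n 10 < 10 := PySem.Int.mod_lt n (by norm_num)
        by_cases h1 : n = -1
        · subst h1
          have hm : PySem.Int.mod (-1 : Int) 10 = 9 := by decide
          have hd : PySem.Int.floordiv (-1 : Int) 10 = -1 := by decide
          have hseen : s.contains 9 = false := by rw [hm] at hc; exact Bool.eq_false_iff.mpr hc
          have hc9 : (PySem.Set.add s (9 : Int)).contains 9 = true := by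
            have h9 : (9 : Int) ∉ s := fun hm9 => by
              rw [Bool.eq_false_iff] at hseen; exact hseen (List.contains_iff_mem.mpr hm9)
            simp only [PySem.Set.add, PySem.Set.contains]
            split <;> simp_all
          rw [hm, hd]
          apply ih _ _ (by norm_num)
          rw [hc9]
          simp only [hseen, if_pos] at hf
          simp
          omega
        · apply ih _ _ (by omega)
          have hna : (PySem.Int.floordiv n 10).natAbs + 1 ≤ n.natAbs := by omega
          split_ifs at hf ⊢ <;> omega

-- The step-by-step validator over an explicit digit list (A's loop body, digits pre-extracted).
def pvFold : List Int → PySem.Set Int → Option (List Int)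
  | [], s => some s
  | d :: r, s => if PySem.Set.contains s d then none else pvFold r (PySem.Set.add s d)

-- On nonnegative input A's loop is pvFold over the digit list B collects
-- (any fuels at least |n|+1 resp. |n| suffice).
theorem pvALoop_eq_fold : ∀ (fa : Nat) (n : Int) (s : PySem.Set Int) (fb : Nat), 0 ≤ n →
    n.natAbs + 1 ≤ fa → n.natAbs ≤ fb →
    pvALoop fa n s = pvFold (pvDigits fb n) s := by
  intro fa
  induction fa with
  | zero => intro n s fb h hfa hfb; omega
  | succ f ih =>
      intro n s fb h hfa hfb
      by_cases hz : n = 0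
      · subst hz
        rw [pvALoop, if_neg (by omega)]
        cases fb <;> simp [pvDigits, pvFold]
      · have hpos : 0 < n := by omega
        have hqr := PySem.Int.floordiv_mul_add_mod n 10
        have hr0 : 0 ≤ PySem.Int.mod n 10 := PySem.Int.mod_nonneg n (by norm_num)
        have hr10 : PySem.Int.mod n 10 < 10 := PySem.Int.mod_lt n (by norm_num)
        have hna : (PySem.Int.floordiv n 10).natAbs + 1 ≤ n.natAbs := by omega
        obtain ⟨fb', rfl⟩ : ∃ fb', fb = fb' + 1 := ⟨fb - 1, by omega⟩
        rw [pvALoop, if_pos hz, pvDigits, if_pos hpos]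
        simp only [pvFold]
        by_cases hc : PySem.Set.contains s (PySem.Int.mod n 10) = true
        · rw [if_pos hc, if_pos hc]
        · rw [if_neg hc, if_neg hc]
          exact ih _ _ _ (by omega) (by omega) (by omega)

-- Counting lemma behind len(set(L)) == len(L): folding Set.add reaches s.length + L.length
-- exactly when L is duplicate-free and disjoint from s.
theorem foldl_add_length (L : List Int) : ∀ s : PySem.Set Int,
    (List.foldl PySem.Set.add s L).length ≤ s.length + L.length ∧
    ((List.foldl PySem.Set.add s L).length = s.length + L.length ↔
      L.Nodup ∧ ∀ x ∈ L, x ∉ s) := by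
  induction L with
  | nil => intro s; simp
  | cons d r ih =>
      intro s
      by_cases hd : PySem.Set.contains s d = true
      · have hmem : d ∈ s := List.contains_iff_mem.mp hd
        have hadd : PySem.Set.add s d = s := by simp [PySem.Set.add, hmem]
        obtain ⟨ih1, ih2⟩ := ih s
        refine ⟨?_, ?_⟩
        · simp only [List.foldl_cons, hadd]; simp at ih1 ⊢; omega
        · constructor
          · intro he; exfalso; simp only [List.foldl_cons, hadd] at he
            simp at he ih1; omega
          · rintro ⟨-, hall⟩; exact absurd hmem (hall d (by simp))
      · have hmem : d ∉ s := fun hm => hd (List.contains_iff_mem.mpr hm)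
        have hadd : PySem.Set.add s d = s ++ [d] := by simp [PySem.Set.add, hmem]
        obtain ⟨ih1, ih2⟩ := ih (s ++ [d])
        simp only [List.foldl_cons, hadd]
        refine ⟨by simp at ih1 ⊢; omega, ?_⟩
        rw [show s.length + (d :: r).length = (s ++ [d]).length + r.length by simp; omega]
        rw [ih2]
        constructor
        · rintro ⟨hnd, hall⟩
          have hdnr : d ∉ r := fun hdr => by simpa using (hall d hdr)
          refine ⟨List.nodup_cons.mpr ⟨hdnr, hnd⟩, fun x hx => ?_⟩
          rcases List.mem_cons.mp hx with hx | hx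
          · exact hx ▸ hmem
          · have := hall x hx; simp at this; exact this.1
        · rintro ⟨hnd, hall⟩
          have hdnr : d ∉ r := (List.nodup_cons.mp hnd).1
          refine ⟨(List.nodup_cons.mp hnd).2, fun x hx => ?_⟩
          have hxs : x ∉ s := hall x (List.mem_cons_of_mem d hx)
          have hxd : x ≠ d := fun he => hdnr (he ▸ hx)
          simp [hxs, hxd]

-- len(set(L)) == len(L) is exactly "no internal duplicate".
theorem ofList_length_iff (L : List Int) :
    (PySem.Set.ofList L).length = L.length ↔ L.Nodup := by
  have h := (foldl_add_length L PySem.Set.empty).2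
  simpa [PySem.Set.ofList, PySem.Set.empty] using h

-- pvFold in bulk form: succeeds iff no internal duplicate and disjoint from the seed,
-- and then computes the fold of Set.add (= Python's set union with insertion order).
theorem pvFold_char (L : List Int) : ∀ s : PySem.Set Int,
    pvFold L s = if L.Nodup ∧ ∀ x ∈ L, x ∉ s then some (List.foldl PySem.Set.add s L) else none := by
  induction L with
  | nil => intro s; simp [pvFold]
  | cons d r ih =>
      intro s
      by_cases hd : PySem.Set.contains s d = true
      · have hmem : d ∈ s := List.contains_iff_mem.mp hd
        rw [pvFold, if_pos hd, if_neg]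
        rintro ⟨-, hall⟩; exact absurd hmem (hall d (by simp))
      · have hmem : d ∉ s := fun hm => hd (List.contains_iff_mem.mpr hm)
        have hadd : PySem.Set.add s d = s ++ [d] := by simp [PySem.Set.add, hmem]
        rw [pvFold, if_neg hd, ih]
        have hcond : (r.Nodup ∧ ∀ x ∈ r, x ∉ PySem.Set.add s d) ↔
            ((d :: r).Nodup ∧ ∀ x ∈ d :: r, x ∉ s) := by
          rw [hadd]
          constructor
          · rintro ⟨hnd, hall⟩
            have hdnr : d ∉ r := fun hdr => by simpa using (hall d hdr)
            refine ⟨List.nodup_cons.mpr ⟨hdnr, hnd⟩, fun x hx => ?_⟩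
            rcases List.mem_cons.mp hx with hx | hx
            · exact hx ▸ hmem
            · have := hall x hx; simp at this; exact this.1
          · rintro ⟨hnd, hall⟩
            have hdnr : d ∉ r := (List.nodup_cons.mp hnd).1
            refine ⟨(List.nodup_cons.mp hnd).2, fun x hx => ?_⟩
            have hxs : x ∉ s := hall x (List.mem_cons_of_mem d hx)
            have hxd : x ≠ d := fun he => hdnr (he ▸ hx)
            simp [hxs, hxd]
        rw [if_congr hcond rfl rfl]
        simp [List.foldl_cons]

-- seen.isdisjoint(digits) says no collected digit was already seen.
theorem isdisjoint_iff (ds L : List Int) :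
    PySem.Set.isdisjoint (PySem.Set.ofList ds) L = true ↔ ∀ x ∈ L, x ∉ PySem.Set.ofList ds := by
  simp only [PySem.Set.isdisjoint, PySem.Set.contains, Bool.not_eq_true', List.any_eq_false,
    List.contains_iff_mem]
  exact ⟨fun h x hx hxs => h x hxs hx, fun h x hx hxL => h x hxL hx⟩

-- ===== VERDICT (by name: the statement is the Claim_ definition above) =====
theorem completed_set_of_digits_if_ok_spec : Claim_equal_completed_set_of_digits_if_ok := by
  intro number ds _
  unfold Spec_completed_set_of_digits_if_ok completed_set_of_digits_if_ok completed_set_of_digits_if_ok_alt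
  by_cases hneg : number < 0
  · rw [if_pos hneg]
    refine pvALoop_neg _ number _ hneg ?_
    split_ifs <;> omega
  · rw [if_neg hneg]
    rw [pvALoop_eq_fold _ number _ number.natAbs (by omega) (by omega) (by omega), pvFold_char]
    have hlen_iff : PySem.Set.len (PySem.Set.ofList (pvDigits number.natAbs number)) = (((pvDigits number.natAbs number).length : Int)) ↔
        (pvDigits number.natAbs number).Nodup := by
      rw [← ofList_length_iff (pvDigits number.natAbs number)]
      simp [PySem.Set.len]
    have hdisj_iff := isdisjoint_iff ds (pvDigits number.natAbs number)
    split_ifs with h1 h2 h3 h4 h5 <;> first | rfl | tauto
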